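-- pv_equiv track=rewrite | github.com/jayesh-onix/data-enrichment-verification-and-mapping | data-enrichment/enrich_accounts_v2.py | bucket_employees
-- ===== SOURCE A (Python) =====
-- EMPLOYEE_BUCKETS = [
--     ("<500", lambda n: n < 500),
--     ("500-1000", lambda n: 500 <= n < 1000),
--     ("1000-2500", lambda n: 1000 <= n < 2500),
--     ("2500-5000", lambda n: 2500 <= n < 5000),
--     ("5000-10000", lambda n: 5000 <= n < 10000),
--     ("10000-25000", lambda n: 10000 <= n < 25000),
--     ("25000-50000", lambda n: 25000 <= n < 50000),
--     (">50000", lambda n: n >= 50000),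
-- ]
--
-- def normalize_string(value: str | None) -> str:
--     if not value:
--         return ""
--     return value.strip()
--
-- def parse_int(value: str | None) -> int | None:
--     if not value:
--         return None
--     digits = "".join(ch for ch in value if ch.isdigit())
--     if not digits:
--         return None
--     try:
--         return int(digits)
--     except ValueError:
--         return None
--
-- def bucket_employees(raw_value: str | None, suggested_bucket: str | None) -> str:
--     cleaned = normalize_string(raw_value)
--     if suggested_bucket:
--         return suggested_bucket
--
--     numeric_guess = parse_int(cleaned)
--     if numeric_guess is None:
--         return ""
--
--     for label, matcher in EMPLOYEE_BUCKETS: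
--         if matcher(numeric_guess):
--             return label
--     return ""
-- ===== SOURCE B (Python) =====
-- BOUNDS = [500, 1000, 2500, 5000, 10000, 25000, 50000]
-- LABELS = ["<500", "500-1000", "1000-2500", "2500-5000", "5000-10000",
--           "10000-25000", "25000-50000", ">50000"]
--
--
-- def _bisect_right(bounds, n, lo, hi):
--     if lo >= hi:
--         return lo
--     mid = (lo + hi) // 2
--     if n < bounds[mid]:
--         return _bisect_right(bounds, n, lo, mid)
--     return _bisect_right(bounds, n, mid + 1, hi)
--
--
-- def bucket_employees(raw_value, suggested_bucket):
--     if suggested_bucket: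
--         return suggested_bucket
--     digits = "".join(ch for ch in (raw_value or "") if ch.isdigit())
--     if not digits:
--         return ""
--     return LABELS[_bisect_right(BOUNDS, int(digits), 0, len(BOUNDS))]
-- ===== Notes on version B (the rewrite author's own statement) =====
-- stated objective: alternative
-- what changed: The sequential scan over EMPLOYEE_BUCKETS' labelled interval predicates is replaced by a binary search over a sorted threshold table indexing into a parallel label list, and the digit extraction is done in a single comprehension over the raw string without the strip pass.
import Mathlib
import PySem

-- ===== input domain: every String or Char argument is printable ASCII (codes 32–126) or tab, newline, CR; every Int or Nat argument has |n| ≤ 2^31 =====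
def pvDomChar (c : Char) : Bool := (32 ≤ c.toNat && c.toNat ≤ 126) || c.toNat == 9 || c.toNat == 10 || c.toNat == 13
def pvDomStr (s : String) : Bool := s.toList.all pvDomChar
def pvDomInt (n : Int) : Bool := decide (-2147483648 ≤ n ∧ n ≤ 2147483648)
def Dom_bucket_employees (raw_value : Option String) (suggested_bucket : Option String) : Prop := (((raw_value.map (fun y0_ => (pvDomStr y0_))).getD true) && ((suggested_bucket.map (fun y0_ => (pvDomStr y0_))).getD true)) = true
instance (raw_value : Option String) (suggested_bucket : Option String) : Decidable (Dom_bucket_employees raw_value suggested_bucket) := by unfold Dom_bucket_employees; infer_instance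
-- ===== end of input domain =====

-- B replaces the sequential labelled-predicate scan over EMPLOYEE_BUCKETS with a binary
-- search over a threshold table (plus a single digit-filter pass); objective: alternative.

-- ===== PORT A =====
def normalize_string (value : Option String) : String :=
  match value with
  | none => ""
  | some v => if v = "" then "" else PySem.Str.strip v

-- "".join of the kept single chars followed by int(...) is ported on the char-list side
-- (PySem.Chars / PySem.Int.ofChars?), which is exact.
def parse_int (value : Option String) : Option Int :=
  match value with
  | none => none
  | some v =>
    if v = "" then none
    else
      let digits := v.toList.filter (fun ch => PySem.Chars.isdigit ch)
      if digits = [] then none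
      else PySem.Int.ofChars? digits   -- try/except ValueError -> the none of ofChars?

def employeeBuckets : List (String × (Int → Bool)) :=
  [("<500", fun n => n < 500),
   ("500-1000", fun n => 500 ≤ n && n < 1000),
   ("1000-2500", fun n => 1000 ≤ n && n < 2500),
   ("2500-5000", fun n => 2500 ≤ n && n < 5000),
   ("5000-10000", fun n => 5000 ≤ n && n < 10000),
   ("10000-25000", fun n => 10000 ≤ n && n < 25000),
   ("25000-50000", fun n => 25000 ≤ n && n < 50000),
   (">50000", fun n => 50000 ≤ n)]

-- the 'for label, matcher in EMPLOYEE_BUCKETS' loop with its early return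
def scanBuckets : List (String × (Int → Bool)) → Int → String
  | [], _ => ""
  | (label, m) :: rest, n => if m n then label else scanBuckets rest n

def bucket_employees (raw_value : Option String) (suggested_bucket : Option String) : String :=
  let cleaned := normalize_string raw_value
  if (suggested_bucket.getD "") ≠ "" then suggested_bucket.getD ""   -- 'if suggested_bucket:'
  else
    match parse_int (some cleaned) with
    | none => ""
    | some n => scanBuckets employeeBuckets n

-- ===== PORT B =====
def pvBounds : List Int := [500, 1000, 2500, 5000, 10000, 25000, 50000]
def pvLabels : List String :=
  ["<500", "500-1000", "1000-2500", "2500-5000", "5000-10000",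
   "10000-25000", "25000-50000", ">50000"]

-- _bisect_right of Source B (recursive halving of the [lo, hi) window)
def bisectRightRec (bounds : List Int) (n lo hi : Int) : Int :=
  if lo ≥ hi then lo
  else
    let mid := PySem.Int.floordiv (lo + hi) 2
    if n < (PySem.List.pyGet? bounds mid).getD 0 then bisectRightRec bounds n lo mid
    else bisectRightRec bounds n (mid + 1) hi
termination_by (hi - lo).toNat
decreasing_by
  · have := PySem.Int.floordiv_two_mid_bounds (lo := lo) (hi := hi) (by omega)
    have h2 : PySem.Int.floordiv (lo + hi) 2 < hi := by
      rw [PySem.Int.floordiv_lt_iff_lt_mul (by omega)]; omega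
    omega
  · have := PySem.Int.floordiv_two_mid_bounds (lo := lo) (hi := hi) (by omega)
    omega

def bucket_employees_alt (raw_value : Option String) (suggested_bucket : Option String) : String :=
  if (suggested_bucket.getD "") ≠ "" then suggested_bucket.getD ""
  else
    let digits := (raw_value.getD "").toList.filter (fun ch => PySem.Chars.isdigit ch)
    if digits = [] then ""
    else
      match PySem.Int.ofChars? digits with
      | none => ""   -- unreachable totalization: digits is a nonempty run of '0'..'9'
      | some n => (PySem.List.pyGet? pvLabels (bisectRightRec pvBounds n 0 7)).getD ""

-- ===== PRECONDITION & SPEC =====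
def Spec_bucket_employees (raw_value : Option String) (suggested_bucket : Option String) (out : String) : Prop := out = bucket_employees_alt raw_value suggested_bucket
instance (raw_value : Option String) (suggested_bucket : Option String) (out : String) : Decidable (Spec_bucket_employees raw_value suggested_bucket out) := by unfold Spec_bucket_employees; infer_instance

-- ===== CLAIM (what is proved, stated in full; the proofs are below) =====
def Claim_equal_bucket_employees : Prop := ∀ (raw_value : Option String) (suggested_bucket : Option String), Dom_bucket_employees raw_value suggested_bucket → Spec_bucket_employees raw_value suggested_bucket (bucket_employees raw_value suggested_bucket)

-- ===== LEMMAS AND PROOFS =====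

-- digits are never dropped by dropWhile isspace
lemma filter_isdigit_dropWhile_isspace (l : List Char) :
    (l.dropWhile PySem.Chars.isspace).filter (fun ch => PySem.Chars.isdigit ch)
      = l.filter (fun ch => PySem.Chars.isdigit ch) := by
  induction l with
  | nil => rfl
  | cons c t ih =>
    by_cases h : PySem.Chars.isspace c = true
    · have hd : PySem.Chars.isdigit c = false := by
        have h0 : ('0').val.toNat = 48 := rfl
        have h9 : ('9').val.toNat = 57 := rfl
        simp only [PySem.Chars.isspace, PySem.Chars.isdigit, Char.toNat] at h ⊢
        simp only [Bool.or_eq_true, Bool.and_eq_true, decide_eq_true_eq,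
          Bool.and_eq_false_iff, decide_eq_false_iff_not, not_le, Char.le_def,
          UInt32.le_iff_toNat_le, h0, h9] at h ⊢
        omega
      simp [h, hd, ih]
    · simp [h]

-- stripping whitespace does not change the kept digit characters
lemma filter_isdigit_strip (l : List Char) :
    (PySem.Chars.strip l).filter (fun ch => PySem.Chars.isdigit ch)
      = l.filter (fun ch => PySem.Chars.isdigit ch) := by
  simp [PySem.Chars.strip, PySem.Chars.rstrip, PySem.Chars.lstrip,
    List.filter_reverse, filter_isdigit_dropWhile_isspace]

-- the binary search lands on the index named by the nested comparisons
lemma hidx (n : Int) : bisectRightRec pvBounds n 0 7 =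
    (if n < 500 then 0 else if n < 1000 then 1 else if n < 2500 then 2 else
     if n < 5000 then 3 else if n < 10000 then 4 else if n < 25000 then 5 else
     if n < 50000 then 6 else 7) := by
  have g0 : (PySem.List.pyGet? pvBounds 0).getD 0 = 500 := by decide
  have g1 : (PySem.List.pyGet? pvBounds 1).getD 0 = 1000 := by decide
  have g2 : (PySem.List.pyGet? pvBounds 2).getD 0 = 2500 := by decide
  have g3 : (PySem.List.pyGet? pvBounds 3).getD 0 = 5000 := by decide
  have g4 : (PySem.List.pyGet? pvBounds 4).getD 0 = 10000 := by decide
  have g5 : (PySem.List.pyGet? pvBounds 5).getD 0 = 25000 := by decide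
  have g6 : (PySem.List.pyGet? pvBounds 6).getD 0 = 50000 := by decide
  have t00 : bisectRightRec pvBounds n 0 0 = 0 := by rw [bisectRightRec.eq_def]; norm_num
  have t11 : bisectRightRec pvBounds n 1 1 = 1 := by rw [bisectRightRec.eq_def]; norm_num
  have t22 : bisectRightRec pvBounds n 2 2 = 2 := by rw [bisectRightRec.eq_def]; norm_num
  have t33 : bisectRightRec pvBounds n 3 3 = 3 := by rw [bisectRightRec.eq_def]; norm_num
  have t44 : bisectRightRec pvBounds n 4 4 = 4 := by rw [bisectRightRec.eq_def]; norm_num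
  have t55 : bisectRightRec pvBounds n 5 5 = 5 := by rw [bisectRightRec.eq_def]; norm_num
  have t66 : bisectRightRec pvBounds n 6 6 = 6 := by rw [bisectRightRec.eq_def]; norm_num
  have t77 : bisectRightRec pvBounds n 7 7 = 7 := by rw [bisectRightRec.eq_def]; norm_num
  have t01 : bisectRightRec pvBounds n 0 1 = if n < 500 then 0 else 1 := by
    rw [bisectRightRec.eq_def]; norm_num [g0, t00, t11]
  have t23 : bisectRightRec pvBounds n 2 3 = if n < 2500 then 2 else 3 := by
    rw [bisectRightRec.eq_def]; norm_num [g2, t22, t33]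
  have t45 : bisectRightRec pvBounds n 4 5 = if n < 10000 then 4 else 5 := by
    rw [bisectRightRec.eq_def]; norm_num [g4, t44, t55]
  have t67 : bisectRightRec pvBounds n 6 7 = if n < 50000 then 6 else 7 := by
    rw [bisectRightRec.eq_def]; norm_num [g6, t66, t77]
  have t03 : bisectRightRec pvBounds n 0 3 =
      (if n < 1000 then if n < 500 then 0 else 1 else if n < 2500 then 2 else 3) := by
    rw [bisectRightRec.eq_def]; norm_num [g1, t01, t23]
  have t47 : bisectRightRec pvBounds n 4 7 =
      (if n < 25000 then if n < 10000 then 4 else 5 else if n < 50000 then 6 else 7) := by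
    rw [bisectRightRec.eq_def]; norm_num [g5, t45, t67]
  rw [bisectRightRec.eq_def]; norm_num [g3, t03, t47]
  split_ifs <;> first | rfl | omega

-- the predicate scan and the binary-search table lookup name the same bucket, for every n
set_option maxHeartbeats 1000000 in
lemma scan_eq_bisect (n : Int) :
    scanBuckets employeeBuckets n
      = (PySem.List.pyGet? pvLabels (bisectRightRec pvBounds n 0 7)).getD "" := by
  rw [hidx]
  have l0 : (PySem.List.pyGet? pvLabels 0).getD "" = "<500" := by decide
  have l1 : (PySem.List.pyGet? pvLabels 1).getD "" = "500-1000" := by decide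
  have l2 : (PySem.List.pyGet? pvLabels 2).getD "" = "1000-2500" := by decide
  have l3 : (PySem.List.pyGet? pvLabels 3).getD "" = "2500-5000" := by decide
  have l4 : (PySem.List.pyGet? pvLabels 4).getD "" = "5000-10000" := by decide
  have l5 : (PySem.List.pyGet? pvLabels 5).getD "" = "10000-25000" := by decide
  have l6 : (PySem.List.pyGet? pvLabels 6).getD "" = "25000-50000" := by decide
  have l7 : (PySem.List.pyGet? pvLabels 7).getD "" = ">50000" := by decide
  simp only [employeeBuckets, scanBuckets]
  split_ifs <;> simp_all

-- ===== VERDICT (by name: the statement is the Claim_ definition above) =====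
theorem bucket_employees_spec : Claim_equal_bucket_employees := by
  intro raw_value suggested_bucket _
  unfold Spec_bucket_employees bucket_employees bucket_employees_alt
  by_cases hs : (suggested_bucket.getD "") = ""
  case neg => simp [hs]
  case pos =>
    simp only [hs, ne_eq, not_true_eq_false, if_false]
    have key : ∀ v : Option String,
        (normalize_string v).toList.filter (fun ch => PySem.Chars.isdigit ch)
          = ((v.getD "").toList.filter (fun ch => PySem.Chars.isdigit ch)) := by
      intro v
      match v with
      | none => rfl
      | some s =>
        by_cases h : s = ""
        · simp [normalize_string, h]
        · simp [normalize_string, h, PySem.Str.toList_strip, filter_isdigit_strip]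
    have hp : ∀ s : String, parse_int (some s) =
        (if s.toList.filter (fun ch => PySem.Chars.isdigit ch) = [] then none
         else PySem.Int.ofChars? (s.toList.filter (fun ch => PySem.Chars.isdigit ch))) := by
      intro s
      by_cases h : s = ""
      · subst h; rfl
      · simp [parse_int, h]
    rw [hp, key raw_value]
    by_cases hd : ((raw_value.getD "").toList.filter (fun ch => PySem.Chars.isdigit ch)) = []
    · simp [hd]
    · simp only [if_neg hd]
      cases hc : PySem.Int.ofChars? ((raw_value.getD "").toList.filter (fun ch => PySem.Chars.isdigit ch)) with
      | none => simp
      | some n => simp [scan_eq_bisect n]
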